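-- pv_equiv track=rewrite | github.com/cantunborn/renpy-chronology-mod | tests/timeline_init_latest.py | _tl_build_shadow_path
-- ===== SOURCE A (Python) =====
-- def _tl_build_shadow_path(history, node_index):
--     """Build the replay-aid shadow path from history nodes after node_index."""
--     path, past = [], False
--     for n in history:
--         if past:
--             loc = n.get("_location")
--             ci  = n.get("chosen_index")
--             if loc is not None and ci is not None:
--                 path.append({"location": loc, "chosen_index": ci})
--         elif n["index"] == node_index:
--             past = True
--     return path
-- ===== SOURCE B (Python) =====
-- def _tl_build_shadow_path(history, node_index):
--     """Build the replay-aid shadow path from history nodes after node_index."""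
--     for j, n in enumerate(history):
--         if n["index"] == node_index:
--             return [{"location": m["_location"], "chosen_index": m["chosen_index"]}
--                     for m in history[j + 1:]
--                     if m.get("_location") is not None and m.get("chosen_index") is not None]
--     return []
-- ===== Notes on version B (the rewrite author's own statement) =====
-- stated objective: simpler
-- what changed: Replaces A's single stateful loop with a 'past' flag and mutable accumulator by a find-the-matching-node pass that returns a single comprehension over the suffix after the match (empty list if no match).
import Mathlib
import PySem

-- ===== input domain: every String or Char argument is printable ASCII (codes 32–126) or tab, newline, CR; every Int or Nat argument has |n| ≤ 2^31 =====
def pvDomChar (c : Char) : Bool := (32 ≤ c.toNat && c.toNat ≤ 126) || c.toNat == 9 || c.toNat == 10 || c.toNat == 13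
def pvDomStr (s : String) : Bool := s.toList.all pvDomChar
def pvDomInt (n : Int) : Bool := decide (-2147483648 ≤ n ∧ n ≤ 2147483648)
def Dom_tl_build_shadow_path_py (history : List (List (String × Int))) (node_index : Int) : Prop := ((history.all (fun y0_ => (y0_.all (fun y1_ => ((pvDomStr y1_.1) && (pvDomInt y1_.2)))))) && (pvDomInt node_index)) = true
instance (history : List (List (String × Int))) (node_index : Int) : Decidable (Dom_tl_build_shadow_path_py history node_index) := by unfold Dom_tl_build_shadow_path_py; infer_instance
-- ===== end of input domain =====

-- B replaces A's single stateful loop (a 'past' flag + accumulator) by find-the-match then one comprehension over the suffix; return-value equivalence only.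

-- ===== PORT A =====
-- dict lookup n.get(k) / n[k]: first match in the association list (List.lookup).
-- A's loop over history with state (path, past); n["index"] raises KeyError when the key
-- is absent (List.lookup = none) — those inputs are excluded by Pre_ below; the port
-- treats the missing key as a non-match there (out of the claimed domain).
def tlA_loop (ni : Int) : List (List (String × Int)) → List (List (String × Int)) → Bool → List (List (String × Int))
  | [], path, _ => path
  | n :: rest, path, past =>
    if past then
      match n.lookup "_location", n.lookup "chosen_index" with
      | some loc, some ci => tlA_loop ni rest (path ++ [[("location", loc), ("chosen_index", ci)]]) past
      | _, _ => tlA_loop ni rest path past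
    else if n.lookup "index" = some ni then
      tlA_loop ni rest path true
    else
      tlA_loop ni rest path false

def tl_build_shadow_path_py (history : List (List (String × Int))) (node_index : Int) : List (List (String × Int)) :=
  tlA_loop node_index history [] false

-- ===== PORT B =====
-- the comprehension over history[j+1:] with its 'is not None' guard
def tlB_tail (rest : List (List (String × Int))) : List (List (String × Int)) :=
  rest.filterMap (fun m =>
    match m.lookup "_location", m.lookup "chosen_index" with
    | some loc, some ci => some [("location", loc), ("chosen_index", ci)]
    | _, _ => none)

-- the enumerate-and-return loop; m["index"] raises KeyError on a missing key (excluded by Pre_)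
def tl_build_shadow_path_py_alt (history : List (List (String × Int))) (node_index : Int) : List (List (String × Int)) :=
  match history with
  | [] => []
  | n :: rest =>
    if n.lookup "index" = some node_index then tlB_tail rest
    else tl_build_shadow_path_py_alt rest node_index

-- ===== PRECONDITION & SPEC =====
-- Pre_ excludes exactly the inputs on which Python A raises KeyError: a node scanned before
-- the first node whose "index" equals node_index lacks the "index" key.
def Pre_tl_build_shadow_path_py (history : List (List (String × Int))) (node_index : Int) : Prop :=
  ∀ n ∈ history.takeWhile (fun n => !(n.lookup "index" == some node_index)),
    (n.lookup "index").isSome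

instance (history : List (List (String × Int))) (node_index : Int) : Decidable (Pre_tl_build_shadow_path_py history node_index) := by unfold Pre_tl_build_shadow_path_py; infer_instance

def pvWitness_tl_build_shadow_path_py : (List (List (String × Int))) × Int :=
  ([[("index", 1)], [("_location", 2), ("chosen_index", 3)]], 1)

def Spec_tl_build_shadow_path_py (history : List (List (String × Int))) (node_index : Int) (out : List (List (String × Int))) : Prop := out = tl_build_shadow_path_py_alt history node_index
instance (history : List (List (String × Int))) (node_index : Int) (out : List (List (String × Int))) : Decidable (Spec_tl_build_shadow_path_py history node_index out) := by unfold Spec_tl_build_shadow_path_py; infer_instance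

-- ===== CLAIM (what is proved, stated in full; the proofs are below) =====
def Claim_equal_tl_build_shadow_path_py : Prop := ∀ (history : List (List (String × Int))) (node_index : Int), Dom_tl_build_shadow_path_py history node_index → Pre_tl_build_shadow_path_py history node_index → Spec_tl_build_shadow_path_py history node_index (tl_build_shadow_path_py history node_index)

-- ===== LEMMAS AND PROOFS =====

-- once 'past' is true, A's loop appends exactly B's comprehension over the remaining nodes
theorem tlA_loop_past (ni : Int) (rest : List (List (String × Int))) :
    ∀ path, tlA_loop ni rest path true = path ++ tlB_tail rest := by
  induction rest with
  | nil => intro path; simp [tlA_loop, tlB_tail]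
  | cons n rest ih =>
    intro path
    simp only [tlA_loop, tlB_tail, List.filterMap_cons]
    cases hl : n.lookup "_location" <;> cases hc : n.lookup "chosen_index" <;>
      simp [ih, tlB_tail]

theorem tlA_loop_false (ni : Int) (history : List (List (String × Int)))
    (hpre : Pre_tl_build_shadow_path_py history ni) :
    ∀ path, tlA_loop ni history path false = path ++ tl_build_shadow_path_py_alt history ni := by
  induction history with
  | nil => intro path; simp [tlA_loop, tl_build_shadow_path_py_alt]
  | cons n rest ih =>
    intro path
    by_cases hm : n.lookup "index" = some ni
    · simp [tlA_loop, tl_build_shadow_path_py_alt, hm, tlA_loop_past]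
    · have hpre' : Pre_tl_build_shadow_path_py rest ni := by
        intro m hmem
        exact hpre m (by simpa [List.takeWhile_cons, hm] using List.mem_cons_of_mem n hmem)
      simp [tlA_loop, tl_build_shadow_path_py_alt, hm, ih hpre']

-- ===== VERDICT (by name: the statement is the Claim_ definition above) =====
theorem tl_build_shadow_path_py_spec : Claim_equal_tl_build_shadow_path_py := by
  intro history ni _ hpre
  unfold Spec_tl_build_shadow_path_py tl_build_shadow_path_py
  simpa using tlA_loop_false ni history hpre []
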